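-- pv_equiv track=rewrite | github.com/moink/AoC2018 | day8/day8.py | process_node_part_two
-- ===== SOURCE A (Python) =====
-- import collections
--
-- def process_node_part_two(data, i):
--     num_children = data[i]
--     num_meta = data[i + 1]
--     total = 0
--     new_i = i + 2
--     children = collections.defaultdict(int)
--     for child in range(num_children):
--         delta, new_i = process_node_part_two(data, new_i)
--         children[child] = delta
--     if num_children == 0:
--         total = sum(data[new_i:new_i+num_meta])
--     else:
--         for index in data[new_i:new_i+num_meta]:
--             total = total + children[index-1]
--     return total, new_i + num_meta
-- ===== SOURCE B (Python) =====
-- def _parse(data, i):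
--     """Read one node starting at index i; return (node, index-after-node).
--
--     A node is (num_children_header, children, metadata)."""
--     num_children = data[i]
--     num_meta = data[i + 1]
--     j = i + 2
--     children = []
--     for _ in range(num_children):
--         child, j = _parse(data, j)
--         children.append(child)
--     meta = data[j:j + num_meta]
--     return (num_children, children, meta), j + num_meta
--
--
-- def _value(node):
--     num_children, children, meta = node
--     if num_children == 0:
--         return sum(meta)
--     vals = [_value(c) for c in children]
--     return sum(vals[m - 1] if 1 <= m <= len(vals) else 0 for m in meta)
--
--
-- def process_node_part_two(data, i):
--     root, new_i = _parse(data, i)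
--     return _value(root), new_i
-- ===== Notes on version B (the rewrite author's own statement) =====
-- stated objective: alternative
-- what changed: A fuses parsing and evaluation in one recursive pass that stores child values in a defaultdict; B first parses the encoding into an explicit tree (header count, children, metadata) and then evaluates that tree with a guarded list lookup in a separate pass.
-- outside the precondition, e.g. on process_node_part_two([-4, 1, -1, -1, -3, 4, -3], -2): A returns (0, -1), B returns (0, -1)
import Mathlib
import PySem

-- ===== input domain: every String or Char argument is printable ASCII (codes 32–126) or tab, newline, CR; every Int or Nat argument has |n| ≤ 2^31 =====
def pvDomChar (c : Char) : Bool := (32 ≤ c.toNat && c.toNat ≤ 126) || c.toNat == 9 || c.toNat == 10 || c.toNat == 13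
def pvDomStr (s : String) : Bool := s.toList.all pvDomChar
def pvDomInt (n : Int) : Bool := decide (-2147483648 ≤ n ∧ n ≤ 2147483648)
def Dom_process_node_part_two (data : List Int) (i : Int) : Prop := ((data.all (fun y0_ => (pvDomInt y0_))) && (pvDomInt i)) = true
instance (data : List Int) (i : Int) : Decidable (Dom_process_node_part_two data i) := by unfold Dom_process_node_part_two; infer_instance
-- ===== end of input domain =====

-- B replaces A's fused recursive pass (child values in a defaultdict) by a parse-to-tree
-- pass followed by a separate evaluation pass (objective: alternative decomposition).

-- ===== PORT A =====
-- fuel only makes the recursion total; under Pre_ it never runs out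
def pA (data : List Int) : Nat → Int → Int × Int
  | 0, _ => (0, 0)
  | fuel+1, i =>
    let nc := PySem.List.pyGetD data i 0
    let nm := PySem.List.pyGetD data (i+1) 0
    let st := (PySem.List.pyRange 0 nc 1).foldl
        (fun (st : PySem.Dict Int Int × Int) child =>
          let r := pA data fuel st.2
          (st.1.insert child r.1, r.2))
        (PySem.Dict.empty, i + 2)
    let total := if nc == 0
      then (PySem.List.slice data (some st.2) (some (st.2 + nm))).sum
      else (PySem.List.slice data (some st.2) (some (st.2 + nm))).foldl
             (fun t idx => t + st.1.getD (idx - 1) 0) 0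
    (total, st.2 + nm)

def process_node_part_two (data : List Int) (i : Int) : Int × Int :=
  pA data (2 * data.length + 1) i

-- ===== PORT B =====
mutual
inductive PTree where
  | node : Int → PForest → List Int → PTree
inductive PForest where
  | nil : PForest
  | cons : PTree → PForest → PForest
end

mutual
-- fuel only makes the recursion total; under Pre_ it never runs out
def parseNode (data : List Int) : Nat → Int → PTree × Int
  | 0, i => (.node 0 .nil [], i)
  | fuel+1, i =>
    let nc := PySem.List.pyGetD data i 0
    let nm := PySem.List.pyGetD data (i+1) 0
    let kj := parseKids data fuel nc.toNat (i+2)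
    (.node nc kj.1 (PySem.List.slice data (some kj.2) (some (kj.2 + nm))), kj.2 + nm)
  termination_by fuel _ => (fuel, 0)

def parseKids (data : List Int) : Nat → Nat → Int → PForest × Int
  | _, 0, j => (.nil, j)
  | fuel, n+1, j =>
    let tj := parseNode data fuel j
    let fj := parseKids data fuel n tj.2
    (.cons tj.1 fj.1, fj.2)
  termination_by fuel n _ => (fuel, n+1)
end

mutual
def evalT : PTree → Int
  | .node nc kids md =>
    if nc == 0 then md.sum
    else
      (md.map (fun m =>
        if 1 ≤ m ∧ m ≤ ((evalF kids).length : Int)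
        then (evalF kids).getD (m-1).toNat 0 else 0)).sum

def evalF : PForest → List Int
  | .nil => []
  | .cons t ts => evalT t :: evalF ts
end

def process_node_part_two_alt (data : List Int) (i : Int) : Int × Int :=
  let p := parseNode data (2 * data.length + 1) i
  (evalT p.1, p.2)

-- ===== PRECONDITION & SPEC =====
-- Structural well-formedness checker for the day-8 encoding: chkW data f tail n i
-- certifies n consecutive sibling nodes starting at index i (the last one in tail
-- position), demanding every header read in range and every non-final node span to
-- advance the index, so the walk terminates; f is one unit per certified node and
-- 2*len+1 suffices for every encoding in the natural domain.  Pre_ admits exactly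
-- the encodings so certified; it excludes inputs where A raises (IndexError /
-- RecursionError) and rare non-monotone encodings on which A happens to return
-- (B returns the same value there; see claim cites).
def chkW (data : List Int) : Nat → Bool → Nat → Int → Option Int
  | 0, _, _, _ => none
  | _+1, _, 0, i => some i
  | f+1, tail, n+1, i =>
    if -(data.length : Int) ≤ i ∧ i + 1 < (data.length : Int) then
      let nc := PySem.List.pyGetD data i 0
      let nm := PySem.List.pyGetD data (i+1) 0
      match chkW data f (tail && n == 0) nc.toNat (i+2) with
      | none => none
      | some j =>
        if (tail && n == 0) = true ∨ i < j + nm then chkW data f tail n (j + nm)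
        else none
    else none

def Pre_process_node_part_two (data : List Int) (i : Int) : Prop :=
  (chkW data (2 * data.length + 1) true 1 i).isSome = true
instance (data : List Int) (i : Int) : Decidable (Pre_process_node_part_two data i) := by
  unfold Pre_process_node_part_two; infer_instance

def pvWitness_process_node_part_two : List Int × Int := ([1, 1, 0, 2, 5, 7, 1], 0)

def Spec_process_node_part_two (data : List Int) (i : Int) (out : Int × Int) : Prop :=
  out = process_node_part_two_alt data i
instance (data : List Int) (i : Int) (out : Int × Int) : Decidable (Spec_process_node_part_two data i out) := by
  unfold Spec_process_node_part_two; infer_instance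

-- ===== CLAIM (what is proved, stated in full; the proofs are below) =====
def Claim_equal_process_node_part_two : Prop :=
  ∀ (data : List Int) (i : Int), Dom_process_node_part_two data i →
    Pre_process_node_part_two data i →
    Spec_process_node_part_two data i (process_node_part_two data i)

-- ===== LEMMAS AND PROOFS =====

-- value list of a parsed forest has one entry per sibling
theorem evalF_cons (t : PTree) (ts : PForest) : evalF (.cons t ts) = evalT t :: evalF ts := rfl

-- folding `+ g m` over a list equals the sum of its image
theorem foldl_add_map (g : Int → Int) (l : List Int) (c : Int) :
    l.foldl (fun t m => t + g m) c = c + (l.map g).sum := by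
  induction l generalizing c with
  | nil => simp
  | cons x xs ih => simp [List.foldl, ih (c + g x)]; ring

-- lookup in the dict built by inserting consecutive keys a, a+1, … paired with vals
theorem zipfold_getD (vals : List Int) :
    ∀ (a : Int) (d : PySem.Dict Int Int) (q dflt : Int),
    (((PySem.List.pyRange a (a + vals.length) 1).zip vals).foldl
        (fun d p => d.insert p.1 p.2) d).getD q dflt
      = if a ≤ q ∧ q < a + vals.length then vals.getD (q - a).toNat dflt
        else d.getD q dflt := by
  induction vals with
  | nil => intro a d q dflt; simp [PySem.List.pyRange_one_eq_nil]
  | cons v vs ih =>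
    intro a d q dflt
    rw [PySem.List.pyRange_one_cons
      (by simp only [List.length_cons]; push_cast; omega : a < a + ((v :: vs).length : Int))]
    have hlen : a + ((v :: vs).length : Int) = (a + 1) + (vs.length : Int) := by
      simp; ring
    rw [hlen]
    simp only [List.zip_cons_cons, List.foldl_cons]
    rw [ih (a + 1) (d.insert a v) q dflt]
    rw [PySem.Dict.getD_insert]
    by_cases h1 : (a+1) ≤ q ∧ q < (a+1) + (vs.length : Int)
    · rw [if_pos h1, if_pos (by omega)]
      have : (q - a).toNat = (q - (a+1)).toNat + 1 := by omega
      simp [this]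
    · rw [if_neg h1]
      by_cases h2 : q = a
      · subst h2
        rw [if_pos rfl, if_pos (by simp; omega)]
        simp
      · rw [if_neg h2, if_neg (by omega)]

-- a certified empty sibling block ends where it starts
theorem chkW_zero (data : List Int) (f : Nat) (tail : Bool) (r j : Int)
    (h : chkW data f tail 0 r = some j) : j = r := by
  cases f <;> simp [chkW] at h <;> omega

-- main invariant: a certified sibling block is parsed to the same end index, its
-- value list has one entry per sibling, and A's child loop builds the dict of
-- exactly those values
theorem kidsMain (data : List Int) :
    ∀ (f : Nat) (tail : Bool) (n : Nat) (i j : Int) (F : Nat),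
      chkW data f tail n i = some j →
      (((data.length : Int) - i).toNat) < F →
      (parseKids data F n i).2 = j ∧
      (evalF (parseKids data F n i).1).length = n ∧
      (0 < n → pA data F i = (evalT (parseNode data F i).1, (parseNode data F i).2)) ∧
      (∀ (ks : List Int) (d : PySem.Dict Int Int), ks.length = n →
        ks.foldl (fun st k => ((st.1.insert k (pA data F st.2).1 : PySem.Dict Int Int),
            (pA data F st.2).2)) (d, i)
          = ((ks.zip (evalF (parseKids data F n i).1)).foldl
              (fun d p => d.insert p.1 p.2) d, j)) := by
  intro f
  induction f with
  | zero => intro tail n i j F h _; simp [chkW] at h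
  | succ f ih =>
    intro tail n i j F hchk hF
    match n with
    | 0 =>
      have hj : j = i := by simpa [chkW] using hchk.symm
      subst hj
      refine ⟨by rw [parseKids], by rw [parseKids]; rfl, by omega, ?_⟩
      intro ks d hks
      rw [List.length_eq_zero_iff] at hks; subst hks
      rw [parseKids]; rfl
    | Nat.succ n =>
      rw [chkW] at hchk
      by_cases hrange : -(data.length : Int) ≤ i ∧ i + 1 < (data.length : Int)
      swap
      · rw [if_neg hrange] at hchk; exact absurd hchk (by simp)
      rw [if_pos hrange] at hchk
      set nc := PySem.List.pyGetD data i 0 with hnc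
      set nm := PySem.List.pyGetD data (i+1) 0 with hnm
      dsimp only [] at hchk
      split at hchk
      next heq => exact absurd hchk (by simp)
      next jj hkids =>
      split at hchk
      swap
      · exact absurd hchk (by simp)
      next hcond =>
      -- hchk : chkW data f tail n (jj + nm) = some j
      obtain ⟨g, rfl⟩ : ∃ g, F = g + 1 := ⟨F - 1, by omega⟩
      have hFg : (((data.length : Int) - (i+2)).toNat) < g := by omega
      obtain ⟨hc1, hc2, -, hc4⟩ := ih (tail && n == 0) nc.toNat (i+2) jj g hkids hFg
      -- abbreviations for the parsed children
      set kj := parseKids data g nc.toNat (i+2) with hkj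
      set vals := evalF kj.1 with hvals
      have hvlen : vals.length = nc.toNat := hc2
      have hchk' : chkW data f tail n (kj.2 + nm) = some j := by rw [hc1]; exact hchk
      -- the parsed node
      have hparse : parseNode data (g+1) i =
          (.node nc kj.1 (PySem.List.slice data (some kj.2) (some (kj.2 + nm))),
           kj.2 + nm) := by
        rw [parseNode]
      -- A's child loop
      have hlenks : (PySem.List.pyRange 0 nc 1).length = nc.toNat := by
        simp [PySem.List.length_pyRange_one]
      have hfold := hc4 (PySem.List.pyRange 0 nc 1) PySem.Dict.empty hlenks
      -- A's value of this node equals B's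
      have hnode : pA data (g+1) i =
          (evalT (parseNode data (g+1) i).1, (parseNode data (g+1) i).2) := by
        rw [hparse]
        simp only [pA]
        rw [← hnc, ← hnm, hfold]
        simp only [evalT, ← hvals, hc1]
        by_cases h0 : nc = 0
        · simp [h0]
        · rw [if_neg (by simpa using h0), if_neg (by simpa using h0)]
          simp only [Prod.mk.injEq]
          refine ⟨?_, trivial⟩
          rw [foldl_add_map, zero_add]
          refine congrArg List.sum ?_
          apply List.map_congr_left
          intro m _
          by_cases hpos : 0 < nc
          · have hrw : PySem.List.pyRange 0 nc 1
                = PySem.List.pyRange 0 (0 + (vals.length : Int)) 1 := by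
              rw [hvlen]; congr 1; omega
            rw [hrw, zipfold_getD vals 0 PySem.Dict.empty (m-1) 0]
            simp only [PySem.Dict.getD_empty, Int.sub_zero]
            by_cases hm : 1 ≤ m ∧ m ≤ (vals.length : Int)
            · rw [if_pos (by omega), if_pos hm]
            · rw [if_neg (by omega), if_neg hm]
          · have hneg : nc < 0 := by omega
            have hnil : PySem.List.pyRange 0 nc 1 = [] :=
              PySem.List.pyRange_one_eq_nil (by omega)
            have hv0 : vals = [] := by
              have : vals.length = 0 := by rw [hvlen]; omega
              exact List.length_eq_zero_iff.mp this
            rw [hnil]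
            simp [hv0, PySem.Dict.getD_empty]
      -- continuation: remaining n siblings
      have hrest : (parseKids data (g+1) n (kj.2 + nm)).2 = j ∧
          (evalF (parseKids data (g+1) n (kj.2 + nm)).1).length = n ∧
          (∀ (ks : List Int) (d : PySem.Dict Int Int), ks.length = n →
            ks.foldl (fun st k => ((st.1.insert k (pA data (g+1) st.2).1 : PySem.Dict Int Int),
                (pA data (g+1) st.2).2)) (d, kj.2 + nm)
              = ((ks.zip (evalF (parseKids data (g+1) n (kj.2 + nm)).1)).foldl
                  (fun d p => d.insert p.1 p.2) d, j)) := by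
        match n, hchk' with
        | 0, hchk' =>
          have hj : j = kj.2 + nm := chkW_zero data f tail (kj.2 + nm) j hchk'
          refine ⟨by rw [parseKids]; omega, by rw [parseKids]; rfl, ?_⟩
          intro ks d hks
          rw [List.length_eq_zero_iff] at hks; subst hks
          rw [parseKids]; simp [hj]
        | Nat.succ m, hchk' =>
          have hij : i < jj + nm := by
            rcases hcond with h | h
            · simp at h
            · exact h
          have hFr : (((data.length : Int) - (kj.2 + nm)).toNat) < g + 1 := by
            rw [hc1]; omega
          have := ih tail (Nat.succ m) (kj.2 + nm) j (g+1) hchk' hFr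
          exact ⟨this.1, this.2.1, this.2.2.2⟩
      obtain ⟨hr1, hr2, hr4⟩ := hrest
      have hkseq : parseKids data (g+1) (Nat.succ n) i =
          (.cons (parseNode data (g+1) i).1 (parseKids data (g+1) n (kj.2 + nm)).1,
           (parseKids data (g+1) n (kj.2 + nm)).2) := by
        rw [parseKids, hparse]
      refine ⟨by rw [hkseq]; exact hr1,
        by rw [hkseq, evalF_cons]; simp [hr2],
        fun _ => hnode, ?_⟩
      intro ks d hks
      match ks with
      | k :: ks' =>
        simp only [List.foldl_cons]
        rw [hnode, hparse]
        have hks' : ks'.length = n := by simpa using hks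
        have htail := hr4 ks' (d.insert k (evalT (PTree.node nc kj.1
          (PySem.List.slice data (some kj.2) (some (kj.2 + nm)))))) hks'
        rw [hkseq, evalF_cons]
        simp only [List.zip_cons_cons, List.foldl_cons]
        rw [hparse]
        exact htail

-- ===== VERDICT (by name: the statement is the Claim_ definition above) =====
theorem process_node_part_two_spec : Claim_equal_process_node_part_two := by
  intro data i _hdom hpre
  unfold Spec_process_node_part_two process_node_part_two process_node_part_two_alt
  unfold Pre_process_node_part_two at hpre
  obtain ⟨j, hj⟩ := Option.isSome_iff_exists.mp hpre
  have hrange : -(data.length : Int) ≤ i ∧ i + 1 < (data.length : Int) := by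
    rw [chkW] at hj
    by_cases h : -(data.length : Int) ≤ i ∧ i + 1 < (data.length : Int)
    · exact h
    · simp [h] at hj
  have hbound : (((data.length : Int) - i).toNat) < 2 * data.length + 1 := by omega
  have h := kidsMain data (2 * data.length + 1) true 1 i j (2 * data.length + 1) hj hbound
  exact h.2.2.1 (by omega)
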